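-- pv_equiv track=rewrite | github.com/muhammadnasif/Student | Ungraded Works/TASK_18.py | func
-- ===== SOURCE A (Python) =====
-- def func(start, end, first, second):
--     sum=0
--     for i in range(start, end):
--         if i % first == 0 and i % second != 0:
--             sum += i
--         elif i % first != 0 and i % second == 0:
--             sum += i
--
--     return sum
-- ===== SOURCE B (Python) =====
-- def func(start, end, first, second):
--     # Closed-form: sum of multiples of |first| + multiples of |second| - 2 * multiples of lcm in [start, end)
--     if start >= end:
--         return 0
--
--     def gcd(a, b):
--         a, b = abs(a), abs(b)
--         while b:
--             a, b = b, a % b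
--         return a
--
--     def msum(d):
--         d = abs(d)
--         lo = -((-start) // d)          # ceil(start / d)
--         hi = (end - 1) // d            # floor((end-1) / d)
--         if hi < lo:
--             return 0
--         return d * (lo + hi) * (hi - lo + 1) // 2
--
--     l = abs(first * second) // gcd(first, second)
--     return msum(first) + msum(second) - 2 * msum(l)
-- ===== Notes on version B (the rewrite author's own statement) =====
-- stated objective: faster
-- what changed: Replaces the O(end-start) loop over the range by O(1) closed-form arithmetic-series sums: sum of multiples of first + of second - 2x sum of multiples of lcm(first,second).
import Mathlib
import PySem

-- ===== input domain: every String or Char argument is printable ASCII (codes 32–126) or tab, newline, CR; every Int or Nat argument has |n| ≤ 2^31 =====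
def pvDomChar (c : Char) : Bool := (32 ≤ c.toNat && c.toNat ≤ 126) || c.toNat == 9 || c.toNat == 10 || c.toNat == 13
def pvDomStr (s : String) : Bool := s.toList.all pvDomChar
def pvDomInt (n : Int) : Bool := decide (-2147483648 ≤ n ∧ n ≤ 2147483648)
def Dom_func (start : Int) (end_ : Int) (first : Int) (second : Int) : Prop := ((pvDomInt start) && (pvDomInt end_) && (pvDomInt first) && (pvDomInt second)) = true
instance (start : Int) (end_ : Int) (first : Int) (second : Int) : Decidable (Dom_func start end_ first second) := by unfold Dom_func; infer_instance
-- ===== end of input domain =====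

-- B replaces A's loop over range(start, end) by closed-form arithmetic-series sums
-- (multiples of first, plus multiples of second, minus twice the multiples of lcm(first, second)).

-- ===== PORT A =====
def func (start : Int) (end_ : Int) (first : Int) (second : Int) : Int :=
  (PySem.List.pyRange start end_ 1).foldl
    (fun sum i =>
      if PySem.Int.mod i first = 0 ∧ ¬ PySem.Int.mod i second = 0 then sum + i
      else if ¬ PySem.Int.mod i first = 0 ∧ PySem.Int.mod i second = 0 then sum + i
      else sum) 0

-- ===== PORT B =====
-- Source B's gcd helper: a, b = abs(a), abs(b); while b: a, b = b, a % b  (natAbs applied at the call)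
def funcAltGcdLoop (a b : Nat) : Nat :=
  if h : b = 0 then a else funcAltGcdLoop b (a % b)
termination_by b
decreasing_by exact Nat.mod_lt _ (Nat.pos_of_ne_zero h)

-- Source B's msum(d): closed-form sum of the multiples of |d| in [start, end)
def funcAltMsum (start : Int) (end_ : Int) (d : Int) : Int :=
  let d := |d|
  let lo := -(PySem.Int.floordiv (-start) d)
  let hi := PySem.Int.floordiv (end_ - 1) d
  if hi < lo then 0
  else PySem.Int.floordiv (d * (lo + hi) * (hi - lo + 1)) 2

def func_alt (start : Int) (end_ : Int) (first : Int) (second : Int) : Int :=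
  if start ≥ end_ then 0
  else
    let l := PySem.Int.floordiv |first * second| ((funcAltGcdLoop first.natAbs second.natAbs : Nat) : Int)
    funcAltMsum start end_ first + funcAltMsum start end_ second - 2 * funcAltMsum start end_ l

-- ===== PRECONDITION & SPEC =====
-- Pre_ excludes exactly the inputs where A raises ZeroDivisionError: a nonempty range with first = 0 or second = 0.
def Pre_func (start : Int) (end_ : Int) (first : Int) (second : Int) : Prop :=
  end_ ≤ start ∨ (first ≠ 0 ∧ second ≠ 0)
instance (start : Int) (end_ : Int) (first : Int) (second : Int) : Decidable (Pre_func start end_ first second) := by unfold Pre_func; infer_instance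

def pvWitness_func : Int × Int × Int × Int := (1, 20, 2, 3)

def Spec_func (start : Int) (end_ : Int) (first : Int) (second : Int) (out : Int) : Prop := out = func_alt start end_ first second
instance (start : Int) (end_ : Int) (first : Int) (second : Int) (out : Int) : Decidable (Spec_func start end_ first second out) := by unfold Spec_func; infer_instance

-- ===== CLAIM (what is proved, stated in full; the proofs are below) =====
def Claim_equal_func : Prop := ∀ (start : Int) (end_ : Int) (first : Int) (second : Int), Dom_func start end_ first second → Pre_func start end_ first second → Spec_func start end_ first second (func start end_ first second)

-- ===== LEMMAS AND PROOFS =====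

-- ceiling division is shifted floor division: -((-a)//d) = (a-1)//d + 1  (0 < d)
lemma pv_ceil_eq_floor_succ (a d : Int) (hd : 0 < d) :
    -(PySem.Int.floordiv (-a) d) = PySem.Int.floordiv (a - 1) d + 1 := by
  have h := (PySem.Int.floordiv_eq_iff_of_pos (a := a - 1) (b := d) hd (q := PySem.Int.floordiv (a-1) d)).mp rfl
  rw [PySem.Int.neg_floordiv_neg_eq_iff_of_pos hd]
  constructor <;> nlinarith [h.1, h.2]

-- b//d = (b-1)//d + [d ∣ b]  (0 < d)
lemma pv_floor_step (b d : Int) (hd : 0 < d) :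
    PySem.Int.floordiv b d = PySem.Int.floordiv (b - 1) d + (if d ∣ b then 1 else 0) := by
  have h := (PySem.Int.floordiv_eq_iff_of_pos (a := b - 1) (b := d) hd (q := PySem.Int.floordiv (b-1) d)).mp rfl
  set p := PySem.Int.floordiv (b-1) d with hp
  by_cases hdvd : d ∣ b
  · obtain ⟨c, hc⟩ := hdvd
    have hpc : p = c - 1 := by
      rw [hp, (PySem.Int.floordiv_eq_iff_of_pos (a := b - 1) (b := d) hd (q := c - 1)).mpr (by constructor <;> nlinarith)]
    have hbc : PySem.Int.floordiv b d = c :=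
      (PySem.Int.floordiv_eq_iff_of_pos (a := b) (b := d) hd (q := c)).mpr (by constructor <;> nlinarith)
    rw [if_pos ⟨c, hc⟩, hbc, hpc]; ring
  · have hbp : PySem.Int.floordiv b d = p := by
      refine (PySem.Int.floordiv_eq_iff_of_pos (a := b) (b := d) hd (q := p)).mpr ⟨by linarith [h.1], ?_⟩
      rcases lt_or_eq_of_le (show b ≤ (p+1)*d by linarith [h.2]) with h' | h'
      · exact h'
      · exact absurd ⟨p+1, by linarith [h']⟩ hdvd
    rw [if_neg hdvd, hbp]; ring

lemma pv_floordiv_two_mul (k : Int) : PySem.Int.floordiv (2 * k) 2 = k := by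
  rw [(PySem.Int.floordiv_eq_iff_of_pos (by norm_num) (q := k)).mpr (by constructor <;> linarith)]

lemma pv_even_prod (lo hi : Int) : ∃ k, (lo + hi) * (hi - lo + 1) = 2 * k := by
  rcases Int.even_or_odd (lo + hi) with ⟨c, hc⟩ | ⟨c, hc⟩
  · exact ⟨c * (hi - lo + 1), by rw [hc]; ring⟩
  · refine ⟨(2*c + 1) * (c + 1 - lo), ?_⟩
    have h1 : hi = 2*c + 1 - lo := by omega
    rw [h1]; ring_nf

-- step of the triangular term: adding one more multiple (h0+1)*D
lemma pv_T_step (D lo h0 : Int) (hple : lo - 1 ≤ h0) :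
    (if h0 + 1 < lo then (0:Int) else PySem.Int.floordiv (D * (lo + (h0+1)) * ((h0+1) - lo + 1)) 2)
    = (if h0 < lo then 0 else PySem.Int.floordiv (D * (lo + h0) * (h0 - lo + 1)) 2) + (h0 + 1) * D := by
  rw [if_neg (by omega)]
  by_cases hlt : h0 < lo
  · have hh : h0 = lo - 1 := by omega
    rw [if_pos hlt, hh]
    have h2 : D * (lo + (lo - 1 + 1)) * ((lo - 1 + 1) - lo + 1) = 2 * (lo * D) := by ring
    rw [h2, pv_floordiv_two_mul]
    ring
  · rw [if_neg hlt]
    obtain ⟨k, hk⟩ := pv_even_prod lo h0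
    have h1 : D * (lo + h0) * (h0 - lo + 1) = 2 * (D * k) := by rw [mul_assoc, hk]; ring
    have h2 : D * (lo + (h0+1)) * ((h0+1) - lo + 1) = 2 * (D * k + (h0 + 1) * D) := by
      have h3 : D * (lo + (h0+1)) * ((h0+1) - lo + 1) = D * ((lo + h0) * (h0 - lo + 1)) + 2 * ((h0+1)*D) := by ring
      rw [h3, hk]; ring
    rw [h1, h2, pv_floordiv_two_mul, pv_floordiv_two_mul]

lemma pv_msum_self (a d : Int) (hd : d ≠ 0) : funcAltMsum a a d = 0 := by
  have hD : 0 < |d| := abs_pos.mpr hd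
  unfold funcAltMsum
  simp only []
  rw [pv_ceil_eq_floor_succ a _ hD]
  rw [if_pos (by omega)]

lemma pv_msum_step (a b d : Int) (hd : d ≠ 0) (hab : a ≤ b) :
    funcAltMsum a (b + 1) d = funcAltMsum a b d + (if d ∣ b then b else 0) := by
  have hD : 0 < |d| := abs_pos.mpr hd
  have habs : (|d| ∣ b) ↔ (d ∣ b) := abs_dvd d b
  unfold funcAltMsum
  simp only []
  set D := |d| with hDdef
  rw [pv_ceil_eq_floor_succ a _ hD]
  set p := PySem.Int.floordiv (a - 1) D with hp
  have hpb := (PySem.Int.floordiv_eq_iff_of_pos (a := a - 1) (b := D) hD (q := p)).mp rfl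
  set h0 := PySem.Int.floordiv (b - 1) D with hh0
  have hh0b := (PySem.Int.floordiv_eq_iff_of_pos (a := b - 1) (b := D) hD (q := h0)).mp rfl
  have hstep : PySem.Int.floordiv (b + 1 - 1) D = h0 + (if D ∣ b then 1 else 0) := by
    have := pv_floor_step b D hD
    simpa using this
  have hple : p + 1 - 1 ≤ h0 := by
    by_contra hc
    rw [not_le] at hc
    nlinarith [hpb.1, hh0b.2]
  by_cases hdvd : D ∣ b
  · have hbval : (h0 + 1) * D = b := by
      obtain ⟨c, hc⟩ := hdvd
      have h4 : h0 = c - 1 := by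
        rw [hh0, (PySem.Int.floordiv_eq_iff_of_pos (a := b - 1) (b := D) hD (q := c - 1)).mpr (by constructor <;> nlinarith)]
      rw [h4, hc]; ring
    rw [hstep, if_pos hdvd, if_pos (habs.mp hdvd)]
    rw [pv_T_step D (p+1) h0 hple, hbval]
  · rw [hstep, if_neg hdvd, add_zero, if_neg ((not_congr habs).mp hdvd), add_zero]

lemma pv_gcdLoop_eq (a b : Nat) : funcAltGcdLoop a b = Nat.gcd a b := by
  induction b using Nat.strong_induction_on generalizing a with
  | _ b ih =>
    unfold funcAltGcdLoop
    by_cases hb : b = 0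
    · simp [hb]
    · rw [dif_neg hb, ih (a % b) (Nat.mod_lt _ (Nat.pos_of_ne_zero hb)) b]
      rw [Nat.gcd_comm b (a % b), ← Nat.gcd_rec b a, Nat.gcd_comm]

lemma pv_l_eq_lcm (f s : Int) :
    PySem.Int.floordiv |f * s| ((funcAltGcdLoop f.natAbs s.natAbs : Nat) : Int) = (Int.lcm f s : Int) := by
  rw [pv_gcdLoop_eq]
  have h1 : |f * s| = ((f.natAbs * s.natAbs : Nat) : Int) := by
    rw [Int.abs_eq_natAbs, Int.natAbs_mul, Nat.cast_mul]
  rw [h1, PySem.Int.floordiv_natCast]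
  exact congrArg _ (rfl : f.natAbs * s.natAbs / Nat.gcd f.natAbs s.natAbs = Nat.lcm f.natAbs s.natAbs)

lemma pv_core (f s l : Int) (hf : f ≠ 0) (hs : s ≠ 0) (hl0 : l ≠ 0)
    (hl : ∀ i : Int, l ∣ i ↔ (f ∣ i ∧ s ∣ i)) :
    ∀ (n : Nat) (a : Int),
      (PySem.List.pyRange a (a + n) 1).foldl
        (fun sum i =>
          if PySem.Int.mod i f = 0 ∧ ¬ PySem.Int.mod i s = 0 then sum + i
          else if ¬ PySem.Int.mod i f = 0 ∧ PySem.Int.mod i s = 0 then sum + i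
          else sum) 0
      = funcAltMsum a (a + n) f + funcAltMsum a (a + n) s - 2 * funcAltMsum a (a + n) l := by
  intro n
  induction n with
  | zero =>
    intro a
    simp only [Nat.cast_zero, add_zero]
    rw [PySem.List.pyRange_one_eq_nil le_rfl]
    rw [pv_msum_self a f hf, pv_msum_self a s hs, pv_msum_self a l hl0]
    simp
  | succ n ih =>
    intro a
    have hb : a + ((n + 1 : Nat) : Int) = (a + n) + 1 := by push_cast; ring
    have hab : a ≤ a + (n : Int) := by omega
    rw [hb, PySem.List.pyRange_one_succ_right hab, List.foldl_append, ih a]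
    rw [pv_msum_step a (a+n) f hf hab, pv_msum_step a (a+n) s hs hab,
        pv_msum_step a (a+n) l hl0 hab]
    simp only [List.foldl_cons, List.foldl_nil]
    simp only [PySem.Int.mod_eq_zero_iff_dvd]
    have hldvd := hl (a + (n : Int))
    by_cases h1 : f ∣ (a + (n : Int)) <;> by_cases h2 : s ∣ (a + (n : Int))
    · rw [if_neg (by tauto), if_neg (by tauto), if_pos (hldvd.mpr ⟨h1, h2⟩), if_pos h1, if_pos h2]
      ring
    · rw [if_pos ⟨h1, h2⟩, if_neg (fun hc => h2 (hldvd.mp hc).2), if_pos h1, if_neg h2]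
      ring
    · rw [if_neg (by tauto), if_pos ⟨h1, h2⟩, if_neg (fun hc => h1 (hldvd.mp hc).1), if_neg h1, if_pos h2]
      ring
    · rw [if_neg (by tauto), if_neg (by tauto), if_neg (fun hc => h1 (hldvd.mp hc).1), if_neg h1, if_neg h2]
      ring

-- ===== VERDICT (by name: the statement is the Claim_ definition above) =====
theorem func_spec : Claim_equal_func := by
  intro a b f s _ hpre
  unfold Spec_func func func_alt
  by_cases hab : b ≤ a
  · rw [PySem.List.pyRange_one_eq_nil hab]
    simp [ge_iff_le, hab]
  · have hlt : a < b := lt_of_not_ge hab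
    have hfs : f ≠ 0 ∧ s ≠ 0 := by
      rcases hpre with h | h
      · omega
      · exact h
    obtain ⟨hf, hs⟩ := hfs
    rw [pv_l_eq_lcm f s]
    have hl0 : (Int.lcm f s : Int) ≠ 0 := by
      exact_mod_cast Int.lcm_ne_zero hf hs
    have hl : ∀ i : Int, (Int.lcm f s : Int) ∣ i ↔ (f ∣ i ∧ s ∣ i) := by
      intro i
      constructor
      · intro h
        exact ⟨(Int.dvd_lcm_left f s).trans h, (Int.dvd_lcm_right f s).trans h⟩
      · intro ⟨h1, h2⟩
        exact Int.coe_lcm_dvd h1 h2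
    have hn : b = a + ((b - a).toNat : Int) := by omega
    rw [if_neg (by omega)]
    rw [hn]
    exact pv_core f s _ hf hs hl0 hl (b - a).toNat a
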